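-- pv_equiv track=rewrite | github.com/senarzuniga/IS-BACKOFFICE | instruction_panel/executor.py | _build_file_listing
-- ===== SOURCE A (Python) =====
-- from typing import Any, Callable
--
-- def _build_file_listing(discovered: list[dict[str, Any]]) -> str:
--     """Build a markdown file listing from discovered file entries."""
--     grouped: dict[str, list[str]] = {}
--     for item in discovered:
--         grouped.setdefault(item.get("doc_type", "unknown"), []).append(item.get("name", ""))
--     lines = ["# Folder File List", f"Total files: {len(discovered)}", ""]
--     for doc_type, names in sorted(grouped.items()):
--         lines.append(f"## {doc_type.upper()} ({len(names)})")
--         lines.extend(f"- {name}" for name in names[:200])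
--         lines.append("")
--     return "\n".join(lines)
-- ===== SOURCE B (Python) =====
-- def _build_file_listing(discovered: list) -> str:
--     """Build a markdown file listing from discovered file entries."""
--     lines = ["# Folder File List", f"Total files: {len(discovered)}", ""]
--     for doc_type in sorted({item.get("doc_type", "unknown") for item in discovered}):
--         names = [item.get("name", "") for item in discovered
--                  if item.get("doc_type", "unknown") == doc_type]
--         lines.append(f"## {doc_type.upper()} ({len(names)})")
--         lines.extend(f"- {name}" for name in names[:200])
--         lines.append("")
--     return "\n".join(lines)
-- ===== Notes on version B (the rewrite author's own statement) =====
-- stated objective: alternative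
-- what changed: B replaces A's one-pass dict grouping (setdefault/append then sorted(items)) with sorting the distinct doc_types and filtering the list once per type to collect names, so no mutable grouping dict exists.
import Mathlib
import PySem

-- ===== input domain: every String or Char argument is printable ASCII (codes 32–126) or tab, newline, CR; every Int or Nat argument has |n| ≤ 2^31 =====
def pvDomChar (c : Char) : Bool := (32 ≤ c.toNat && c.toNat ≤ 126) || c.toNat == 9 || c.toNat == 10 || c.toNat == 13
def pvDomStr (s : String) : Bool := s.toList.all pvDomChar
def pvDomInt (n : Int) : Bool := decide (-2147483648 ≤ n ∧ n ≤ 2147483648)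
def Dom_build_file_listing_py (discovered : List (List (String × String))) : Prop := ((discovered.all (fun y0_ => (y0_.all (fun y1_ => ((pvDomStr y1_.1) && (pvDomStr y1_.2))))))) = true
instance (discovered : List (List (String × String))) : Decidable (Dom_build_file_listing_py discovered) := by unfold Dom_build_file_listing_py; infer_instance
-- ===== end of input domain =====

-- B builds the listing by sorting the distinct doc_types and filtering the input once per type,
-- instead of A's mutable grouping dict; same output, a different decomposition (objective: alternative).

-- item.get(k, dflt) on a Python dict (assoc list, first match)
def pvGet (item : List (String × String)) (k dflt : String) : String :=
  (PySem.Dict.mk item).getD k dflt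

-- ===== PORT A =====
def build_file_listing_py (discovered : List (List (String × String))) : String :=
  -- grouped.setdefault(key, []).append(name)  ≡  grouped[key] = grouped.get(key, []) + [name]
  let grouped := discovered.foldl
    (fun d item => d.modify (pvGet item "doc_type" "unknown") [] (· ++ [pvGet item "name" ""]))
    PySem.Dict.empty
  let lines := ["# Folder File List", "Total files: " ++ PySem.Int.toStr (discovered.length : Int), ""]
  -- sorted(grouped.items()): dict keys are distinct, so Python's tuple comparison is decided by the key
  let lines := (PySem.List.sorted grouped.items (fun p => p.1) false).foldl
    (fun ls p =>
      (ls ++ ["## " ++ PySem.Str.upper p.1 ++ " (" ++ PySem.Int.toStr (p.2.length : Int) ++ ")"])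
        ++ (PySem.List.slice p.2 none (some 200)).map (fun name => "- " ++ name) ++ [""])
    lines
  PySem.Str.join "\n" lines

-- ===== PORT B =====
def build_file_listing_py_alt (discovered : List (List (String × String))) : String :=
  let header := ["# Folder File List", "Total files: " ++ PySem.Int.toStr (discovered.length : Int), ""]
  let keys := PySem.List.sorted
    (PySem.Set.ofList (discovered.map (fun item => pvGet item "doc_type" "unknown")))
    (fun k => k) false
  let lines := keys.foldl
    (fun ls k =>
      let names := (discovered.filter (fun item => pvGet item "doc_type" "unknown" == k)).map
        (fun item => pvGet item "name" "")
      (ls ++ ["## " ++ PySem.Str.upper k ++ " (" ++ PySem.Int.toStr (names.length : Int) ++ ")"])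
        ++ (PySem.List.slice names none (some 200)).map (fun name => "- " ++ name) ++ [""])
    header
  PySem.Str.join "\n" lines

-- ===== PRECONDITION & SPEC =====
def Spec_build_file_listing_py (discovered : List (List (String × String))) (out : String) : Prop := out = build_file_listing_py_alt discovered
instance (discovered : List (List (String × String))) (out : String) : Decidable (Spec_build_file_listing_py discovered out) := by unfold Spec_build_file_listing_py; infer_instance

-- ===== CLAIM (what is proved, stated in full; the proofs are below) =====
def Claim_equal_build_file_listing_py : Prop := ∀ (discovered : List (List (String × String))), Dom_build_file_listing_py discovered → Spec_build_file_listing_py discovered (build_file_listing_py discovered)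

-- ===== LEMMAS AND PROOFS =====

-- A's sorted grouped items, keyed on the (distinct) doc_types, is exactly B's sorted
-- distinct-key list paired with the per-key filtered names.
theorem sorted_items_eq (discovered : List (List (String × String))) :
    PySem.List.sorted
      (discovered.foldl
        (fun d item => d.modify (pvGet item "doc_type" "unknown") [] (· ++ [pvGet item "name" ""]))
        PySem.Dict.empty).items (fun p => p.1) false
    = (PySem.List.sorted
        (PySem.Set.ofList (discovered.map (fun item => pvGet item "doc_type" "unknown")))
        (fun k => k) false).map
        (fun k => (k, (discovered.filter (fun item => pvGet item "doc_type" "unknown" == k)).map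
          (fun item => pvGet item "name" ""))) := by
  set dt := fun item : List (String × String) => pvGet item "doc_type" "unknown" with hdt
  set nm := fun item : List (String × String) => pvGet item "name" "" with hnm
  set grouped := discovered.foldl
    (fun d item => d.modify (dt item) [] (· ++ [nm item])) PySem.Dict.empty with hg
  have hfold : grouped = (discovered.map (fun it => (dt it, nm it))).foldl
      (fun d p => d.modify p.1 [] (· ++ [p.2])) PySem.Dict.empty := by
    rw [List.foldl_map]
  have hkeys : grouped.keys = PySem.Set.ofList (discovered.map dt) := by
    rw [hg, PySem.Dict.keys_foldl_modify_key, PySem.Dict.keys_empty, PySem.Set.update_nil_left]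
  have hnd : grouped.keys.Nodup := by
    rw [hkeys]; exact PySem.Set.nodup_ofList _
  have hgetD : ∀ k, grouped.getD k [] =
      (discovered.filter (fun item => dt item == k)).map nm := by
    intro k
    rw [hfold, PySem.Dict.getD_foldl_modify_append, PySem.Dict.getD_empty]
    simp [List.filter_map, List.map_map, Function.comp_def]
  have hitems : grouped.items = (PySem.Set.ofList (discovered.map dt)).map
      (fun k => (k, (discovered.filter (fun item => dt item == k)).map nm)) := by
    rw [PySem.Dict.items_eq_map_keys grouped hnd [], hkeys]
    exact List.map_congr_left (fun k _ => by rw [hgetD])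
  rw [hitems]
  apply PySem.List.sorted_eq_of_perm_of_pairwise_lt
  · exact (PySem.List.sorted_perm _ _ _).map _
  · rw [List.pairwise_map]
    exact PySem.List.sorted_ofList_pairwise_lt (discovered.map dt)

theorem build_file_listing_py_spec : Claim_equal_build_file_listing_py := by
  intro discovered _
  unfold Spec_build_file_listing_py
  simp only [build_file_listing_py, build_file_listing_py_alt, sorted_items_eq, List.foldl_map]

-- ===== VERDICT (by name: the statement is the Claim_ definition above) =====
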